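-- pv_equiv track=rewrite | github.com/awalm/purchase-tracker | scripts/parse_invoice_pdf.py | _expand_multiline_row
-- ===== SOURCE A (Python) =====
-- def _expand_multiline_row(cells: list) -> list[list]:
--     """Expand a table row where cells contain newlines into multiple rows.
--
--     Some PDFs pack multiple items into a single table row using \\n within
--     cells.  E.g. ['PS VR2\\nPS5 Digital', '7\\n1', '423.00\\n453.00', ...]
--     becomes two separate rows.  If no cell has a newline, returns [cells].
--     """
--     max_lines = max((c.count('\n') + 1 for c in cells if c), default=1)
--     if max_lines <= 1:
--         return [cells]
--
--     rows = []
--     for i in range(max_lines):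
--         row = []
--         for c in cells:
--             parts = c.split('\n')
--             row.append(parts[i].strip() if i < len(parts) else "")
--         rows.append(row)
--     return rows
-- ===== SOURCE B (Python) =====
-- def _expand_multiline_row(cells: list) -> list[list]:
--     """Expand a newline-packed table row by building padded COLUMNS and
--     transposing with zip(*...), instead of an index loop over lines that
--     re-reads every cell per line."""
--     k = max((c.count('\n') + 1 for c in cells if c), default=1)
--     if k <= 1:
--         return [cells]
--     cols = [([p.strip() for p in c.split('\n')] + [''] * k)[:k] for c in cells]
--     return [list(r) for r in zip(*cols)]
-- ===== Notes on version B (the rewrite author's own statement) =====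
-- stated objective: alternative
-- what changed: B builds per-cell columns (split+strip once, padded to the line count) and produces the rows by transposing them with zip(*cols), instead of A's per-line index loop that re-splits and indexes every cell for each output line.
import Mathlib
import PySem

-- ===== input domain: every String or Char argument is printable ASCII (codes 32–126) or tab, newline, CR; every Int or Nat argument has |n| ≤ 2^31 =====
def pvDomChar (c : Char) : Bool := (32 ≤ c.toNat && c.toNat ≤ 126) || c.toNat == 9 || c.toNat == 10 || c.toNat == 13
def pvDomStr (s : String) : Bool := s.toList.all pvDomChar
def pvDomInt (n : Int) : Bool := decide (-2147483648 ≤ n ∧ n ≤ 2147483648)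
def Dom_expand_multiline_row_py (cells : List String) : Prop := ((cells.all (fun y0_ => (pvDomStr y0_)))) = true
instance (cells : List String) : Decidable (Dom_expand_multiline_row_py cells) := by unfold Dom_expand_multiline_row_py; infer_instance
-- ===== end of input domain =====

-- B builds padded columns (one split+strip per cell) and transposes them zip-style,
-- instead of A's per-line index loop re-splitting every cell (objective: alternative).


-- ===== PORT A =====
def expand_multiline_row_py (cells : List String) : List (List String) :=
  let max_lines : Int :=
    PySem.List.maxD
      (cells.filterMap (fun c => if c ≠ "" then some ((PySem.Str.count c "\n" : Int) + 1) else none))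
      (fun x => x) 1
  if max_lines ≤ 1 then [cells]
  else
    (PySem.List.pyRange 0 max_lines 1).foldl (fun rows i =>
      rows ++ [cells.foldl (fun row c =>
        let parts := (PySem.Str.split? c "\n").getD []   -- sep "\n" ≠ "": split? is always some
        row ++ [if i < (parts.length : Int) then PySem.Str.strip (PySem.List.pyGetD parts i "") else ""]) []]) []

-- ===== PORT B =====
-- zip(*cols): take the heads while every list is nonempty (Python zip stops at the shortest)
def pvZipStar (cols : List (List String)) : List (List String) :=
  if h : cols ≠ [] ∧ cols.all (fun l => !l.isEmpty) then
    (cols.map (fun l => l.headD "")) :: pvZipStar (cols.map List.tail)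
  else []
termination_by (cols.headD []).length
decreasing_by
  rcases cols with _ | ⟨x, rest⟩
  · exact absurd rfl h.1
  · have hx : x ≠ [] := by
      have := h.2
      simp [List.all_cons] at this
      simpa [List.isEmpty_iff] using this.1
    rcases x with _ | ⟨a, t⟩
    · exact absurd rfl hx
    · simp

def expand_multiline_row_py_alt (cells : List String) : List (List String) :=
  let k : Int :=
    PySem.List.maxD
      (cells.filterMap (fun c => if c ≠ "" then some ((PySem.Str.count c "\n" : Int) + 1) else none))
      (fun x => x) 1
  if k ≤ 1 then [cells]
  else
    -- ([p.strip() for p in c.split('\n')] + [''] * k)[:k] — [:k] with k ≥ 0 is take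
    let cols := cells.map (fun c =>
      (((PySem.Str.split? c "\n").getD []).map PySem.Str.strip ++ List.replicate k.toNat "").take k.toNat)
    pvZipStar cols

-- ===== PRECONDITION & SPEC =====
def Spec_expand_multiline_row_py (cells : List String) (out : List (List String)) : Prop := out = expand_multiline_row_py_alt cells
instance (cells : List String) (out : List (List String)) : Decidable (Spec_expand_multiline_row_py cells out) := by unfold Spec_expand_multiline_row_py; infer_instance

-- ===== CLAIM (what is proved, stated in full; the proofs are below) =====
def Claim_equal_expand_multiline_row_py : Prop := ∀ (cells : List String), Dom_expand_multiline_row_py cells → Spec_expand_multiline_row_py cells (expand_multiline_row_py cells)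

-- ===== LEMMAS AND PROOFS =====

-- zip-style transpose of equal-length nonempty column lists = row-major indexing
theorem pvZipStar_eq_rows (n : Nat) (cols : List (List String))
    (hne : cols ≠ []) (hlen : ∀ l ∈ cols, l.length = n) :
    pvZipStar cols = (List.range n).map (fun j => cols.map (fun l => l.getD j "")) := by
  induction n generalizing cols with
  | zero =>
    rcases cols with _ | ⟨x, rest⟩
    · exact absurd rfl hne
    · have hx : x = [] := List.eq_nil_of_length_eq_zero (hlen x (by simp))
      rw [pvZipStar]
      simp [hx]
  | succ m ih =>
    have hall : cols.all (fun l => !l.isEmpty) = true := by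
      simp only [List.all_eq_true]
      intro l hl
      have := hlen l hl
      rcases l with _ | ⟨a, t⟩
      · simp at this
      · simp
    rw [pvZipStar]
    rw [dif_pos ⟨hne, hall⟩]
    have htail : pvZipStar (cols.map List.tail)
        = (List.range m).map (fun j => (cols.map List.tail).map (fun l => l.getD j "")) := by
      apply ih
      · simpa using hne
      · intro l hl
        rcases List.mem_map.mp hl with ⟨l', hl', rfl⟩
        have := hlen l' hl'
        rcases l' with _ | ⟨a, t⟩
        · simp at this
        · simpa using Nat.succ_injective (by simpa using this)
    rw [htail, List.range_succ_eq_map, List.map_cons]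
    congr 1
    · refine List.map_congr_left (fun l hl => ?_)
      rcases l with _ | ⟨a, t⟩ <;> rfl
    · rw [List.map_map]
      refine List.map_congr_left (fun j _ => ?_)
      rw [List.map_map]
      refine List.map_congr_left (fun l _ => ?_)
      rcases l with _ | ⟨a, t⟩ <;> rfl

-- the padded column of a cell, read at j < k, is A's per-line expression for that cell
theorem pv_col_getD (c : String) (kn j : Nat) (hj : j < kn) :
    ((((PySem.Str.split? c "\n").getD []).map PySem.Str.strip ++ List.replicate kn "").take kn).getD j ""
    = (if (j : Int) < ((((PySem.Str.split? c "\n").getD [])).length : Int)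
        then PySem.Str.strip (PySem.List.pyGetD ((PySem.Str.split? c "\n").getD []) (j : Int) "")
        else "") := by
  set parts := (PySem.Str.split? c "\n").getD [] with hp
  have hstrip : PySem.Str.strip "" = "" := by decide
  have htake : ((parts.map PySem.Str.strip ++ List.replicate kn "").take kn).getD j ""
      = (parts.map PySem.Str.strip ++ List.replicate kn "").getD j "" := by
    rcases Nat.lt_or_ge j (parts.map PySem.Str.strip ++ List.replicate kn "").length with h | h
    · have hjt : j < ((parts.map PySem.Str.strip ++ List.replicate kn "").take kn).length := by
        simp [List.length_take]; omega
      rw [List.getD_eq_getElem _ _ hjt, List.getD_eq_getElem _ _ h]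
      simp [List.getElem_take]
    · simp [List.length_append, List.length_map, List.length_replicate] at h
      omega
  rw [htake]
  rw [PySem.List.pyGetD_natCast]
  by_cases hlt : j < parts.length
  · rw [if_pos (by exact_mod_cast hlt)]
    have hlt' : j < (parts.map PySem.Str.strip).length := by simpa using hlt
    rw [List.getD_eq_getElem _ _ (by simpa [List.length_append] using Nat.lt_of_lt_of_le hlt' (Nat.le_add_right _ _)),
        List.getD_eq_getElem _ _ hlt]
    rw [List.getElem_append_left hlt']
    simp
  · rw [if_neg (by exact_mod_cast hlt)]
    have hge : (parts.map PySem.Str.strip).length ≤ j := by simpa using Nat.le_of_not_lt hlt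
    rcases Nat.lt_or_ge j (parts.map PySem.Str.strip ++ List.replicate kn "").length with h | h
    · rw [List.getD_eq_getElem _ _ h, List.getElem_append_right hge]
      simp
    · rw [List.getD_eq_default _ _ h]

-- ===== VERDICT (by name: the statement is the Claim_ definition above) =====
theorem expand_multiline_row_py_spec : Claim_equal_expand_multiline_row_py := by
  intro cells _
  unfold Spec_expand_multiline_row_py expand_multiline_row_py expand_multiline_row_py_alt
  simp only []
  set k : Int :=
    PySem.List.maxD
      (cells.filterMap (fun c => if c ≠ "" then some ((PySem.Str.count c "\n" : Int) + 1) else none))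
      (fun x => x) 1 with hk
  split
  · rfl
  · rename_i hk2
    have hcne : cells ≠ [] := by
      intro h; subst h
      have hk1 : k = 1 := by rw [hk]; rfl
      omega
    rw [PySem.List.foldl_append_singleton_eq_map, List.nil_append]
    rw [pvZipStar_eq_rows k.toNat _ (by simpa using hcne)
        (by intro l hl
            rcases List.mem_map.mp hl with ⟨c, _, rfl⟩
            simp only [List.length_take, List.length_append, List.length_map,
              List.length_replicate]
            omega)]
    rw [PySem.List.pyRange_one, List.map_map]
    simp only [Int.sub_zero]
    refine List.map_congr_left (fun j hj => ?_)
    have hjk : j < k.toNat := List.mem_range.mp hj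
    simp only [Function.comp]
    rw [PySem.List.foldl_append_singleton_eq_map, List.nil_append, List.map_map]
    refine List.map_congr_left (fun c _ => ?_)
    simpa [Function.comp, Int.zero_add] using (pv_col_getD c k.toNat j hjk).symm
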